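-- pv_equiv track=rewrite | github.com/Steve-Shambles/The-Poker-machine | tpm-v1-2_march_2023.py | check_one_pairs
-- ===== SOURCE A (Python) =====
-- from collections import defaultdict
--
-- def check_one_pairs(hand):
--     """Check for a pair of jacks, queens, kings or aces, reject lower pairs."""
--     # Reset check for winning pairs.
--     pair_aces = 0
--     pair_kings = 0
--     pair_queens = 0
--     pair_jacks = 0
--
--     values = [i[0] for i in hand]
--
--     value_counts = defaultdict(lambda: 0)
--     for v in values:
--         value_counts[v] += 1
--
--         if v == 'A':
--             pair_aces += 1
--             if pair_aces == 2:
--                 return True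
--
--         if v == 'K':
--             pair_kings += 1
--             if pair_kings == 2:
--                 return True
--
--         if v == 'Q':
--             pair_queens += 1
--             if pair_queens == 2:
--                 return True
--
--         if v == 'J':
--             pair_jacks += 1
--             if pair_jacks == 2:
--                 return True
--
--     else:
--         return False
-- ===== SOURCE B (Python) =====
-- def check_one_pairs(hand):
--     """Check for a pair of jacks, queens, kings or aces, reject lower pairs."""
--     counts = {}
--     for card in hand:
--         v = card[0]
--         counts[v] = counts.get(v, 0) + 1
--     return any(counts.get(v, 0) >= 2 for v in ('A', 'K', 'Q', 'J'))
-- ===== Notes on version B (the rewrite author's own statement) =====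
-- stated objective: simpler
-- what changed: Replaces the interleaved four-counter early-return loop with a count phase (one frequency dict) followed by a separate check over the four high ranks.
import Mathlib
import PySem

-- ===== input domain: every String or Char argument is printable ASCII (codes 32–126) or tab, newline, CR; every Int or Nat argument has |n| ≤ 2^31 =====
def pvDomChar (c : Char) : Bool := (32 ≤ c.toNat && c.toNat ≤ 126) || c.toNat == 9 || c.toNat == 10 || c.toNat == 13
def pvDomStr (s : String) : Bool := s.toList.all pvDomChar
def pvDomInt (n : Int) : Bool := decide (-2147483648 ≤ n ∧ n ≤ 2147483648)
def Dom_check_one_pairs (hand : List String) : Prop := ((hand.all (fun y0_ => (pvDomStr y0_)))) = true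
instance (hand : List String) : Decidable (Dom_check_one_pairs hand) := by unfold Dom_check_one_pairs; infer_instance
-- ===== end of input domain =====

-- B: count card values once into a frequency dict, then separately check the four
-- high ranks — simpler two-phase decomposition of A's interleaved early-return loop.


-- ===== PORT A =====
-- A's loop: defaultdict tally plus four pair counters, early return the moment a
-- high-rank counter reaches 2, False when the loop ends.
def copLoop : List Char → PySem.Dict Char Int → Int → Int → Int → Int → Bool
  | [], _, _, _, _, _ => false
  | v :: rest, d, pa, pk, pq, pj =>
    let d' := d.modify v 0 (· + 1)
    let pa' := if v = 'A' then pa + 1 else pa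
    if v = 'A' ∧ pa' = 2 then true else
    let pk' := if v = 'K' then pk + 1 else pk
    if v = 'K' ∧ pk' = 2 then true else
    let pq' := if v = 'Q' then pq + 1 else pq
    if v = 'Q' ∧ pq' = 2 then true else
    let pj' := if v = 'J' then pj + 1 else pj
    if v = 'J' ∧ pj' = 2 then true else
    copLoop rest d' pa' pk' pq' pj'

def check_one_pairs (hand : List String) : Bool :=
  -- Pre_ guarantees every card is nonempty, so `i[0]` never raises; `.getD ' '`
  -- only totalises the port.
  let values := hand.map (fun i => (PySem.Str.pyGet? i 0).getD ' ')
  copLoop values PySem.Dict.empty 0 0 0 0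

-- ===== PORT B =====
def check_one_pairs_alt (hand : List String) : Bool :=
  let counts : PySem.Dict Char Int :=
    hand.foldl (fun d card =>
      d.insert ((PySem.Str.pyGet? card 0).getD ' ')
        (d.getD ((PySem.Str.pyGet? card 0).getD ' ') 0 + 1)) PySem.Dict.empty
  ['A', 'K', 'Q', 'J'].any (fun v => counts.getD v 0 ≥ 2)

-- ===== PRECONDITION & SPEC =====
-- Pre_ excludes hands containing an empty card string, on which A's `i[0]` raises IndexError.
def Pre_check_one_pairs (hand : List String) : Prop := ∀ s ∈ hand, s ≠ ""
instance (hand : List String) : Decidable (Pre_check_one_pairs hand) := by unfold Pre_check_one_pairs; infer_instance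
def pvWitness_check_one_pairs : List String := ["AS", "KH", "AD"]
def Spec_check_one_pairs (hand : List String) (out : Bool) : Prop := out = check_one_pairs_alt hand
instance (hand : List String) (out : Bool) : Decidable (Spec_check_one_pairs hand out) := by unfold Spec_check_one_pairs; infer_instance

-- ===== CLAIM (what is proved, stated in full; the proofs are below) =====
def Claim_equal_check_one_pairs : Prop := ∀ (hand : List String), Dom_check_one_pairs hand → Pre_check_one_pairs hand → Spec_check_one_pairs hand (check_one_pairs hand)

-- ===== LEMMAS AND PROOFS =====

-- A's loop returns true iff some high rank's starting tally plus its remaining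
-- occurrences reaches 2 (counters start below 2; the dict is dead state).
lemma copLoop_eq (vals : List Char) (d : PySem.Dict Char Int) (pa pk pq pj : Int)
    (ha : 0 ≤ pa ∧ pa ≤ 1) (hk : 0 ≤ pk ∧ pk ≤ 1)
    (hq : 0 ≤ pq ∧ pq ≤ 1) (hj : 0 ≤ pj ∧ pj ≤ 1) :
    copLoop vals d pa pk pq pj =
      decide (2 ≤ pa + (vals.count 'A' : Int) ∨ 2 ≤ pk + (vals.count 'K' : Int) ∨
              2 ≤ pq + (vals.count 'Q' : Int) ∨ 2 ≤ pj + (vals.count 'J' : Int)) := by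
  induction vals generalizing d pa pk pq pj with
  | nil => simp [copLoop]; omega
  | cons v rest ih =>
    by_cases hA : v = 'A'
    · subst hA
      simp only [copLoop, List.count_cons, Char.reduceEq, if_false, false_and, beq_self_eq_true,
        if_true, beq_iff_eq, true_and]
      split_ifs with h
      · rw [eq_comm, decide_eq_true_iff]; push_cast; omega
      · rw [ih (d.modify 'A' 0 (· + 1)) (pa + 1) pk pq pj (by omega) hk hq hj,
          decide_eq_decide]; push_cast; omega
    · by_cases hK : v = 'K'
      · subst hK
        simp only [copLoop, List.count_cons, Char.reduceEq, if_false, false_and, beq_self_eq_true,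
          if_true, beq_iff_eq, true_and]
        split_ifs with h
        · rw [eq_comm, decide_eq_true_iff]; push_cast; omega
        · rw [ih (d.modify 'K' 0 (· + 1)) pa (pk + 1) pq pj ha (by omega) hq hj,
            decide_eq_decide]; push_cast; omega
      · by_cases hQ : v = 'Q'
        · subst hQ
          simp only [copLoop, List.count_cons, Char.reduceEq, if_false, false_and, beq_self_eq_true,
            if_true, beq_iff_eq, true_and]
          split_ifs with h
          · rw [eq_comm, decide_eq_true_iff]; push_cast; omega
          · rw [ih (d.modify 'Q' 0 (· + 1)) pa pk (pq + 1) pj ha hk (by omega) hj,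
              decide_eq_decide]; push_cast; omega
        · by_cases hJ : v = 'J'
          · subst hJ
            simp only [copLoop, List.count_cons, Char.reduceEq, if_false, false_and, beq_self_eq_true,
              if_true, beq_iff_eq, true_and]
            split_ifs with h
            · rw [eq_comm, decide_eq_true_iff]; push_cast; omega
            · rw [ih (d.modify 'J' 0 (· + 1)) pa pk pq (pj + 1) ha hk hq (by omega),
                decide_eq_decide]; push_cast; omega
          · have cA : (v == 'A') = false := beq_eq_false_iff_ne.mpr hA
            have cK : (v == 'K') = false := beq_eq_false_iff_ne.mpr hK
            have cQ : (v == 'Q') = false := beq_eq_false_iff_ne.mpr hQ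
            have cJ : (v == 'J') = false := beq_eq_false_iff_ne.mpr hJ
            simp only [copLoop, List.count_cons, cA, cK, cQ, cJ, if_neg hA, if_neg hK, if_neg hQ,
              if_neg hJ, if_neg (fun h : _ ∧ _ => hA h.1), if_neg (fun h : _ ∧ _ => hK h.1),
              if_neg (fun h : _ ∧ _ => hQ h.1), if_neg (fun h : _ ∧ _ => hJ h.1),
              Bool.false_eq_true]
            exact ih (d.modify v 0 (· + 1)) pa pk pq pj ha hk hq hj

theorem check_one_pairs_spec : Claim_equal_check_one_pairs := by
  intro hand _ _
  unfold Spec_check_one_pairs check_one_pairs check_one_pairs_alt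
  rw [copLoop_eq _ _ _ _ _ _ (by omega) (by omega) (by omega) (by omega)]
  have hfold : ∀ c : Char,
      (hand.foldl (fun d card =>
        d.insert ((PySem.Str.pyGet? card 0).getD ' ')
          (d.getD ((PySem.Str.pyGet? card 0).getD ' ') 0 + 1)) PySem.Dict.empty).getD c 0
      = ((hand.map (fun i => (PySem.Str.pyGet? i 0).getD ' ')).count c : Int) := by
    intro c
    have h := PySem.Dict.getD_foldl_insert_add_one
      (l := hand.map (fun i => (PySem.Str.pyGet? i 0).getD ' '))
      (d := (PySem.Dict.empty : PySem.Dict Char Int)) (v := c)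
    rw [List.foldl_map] at h
    simpa using h
  simp only [hfold, List.any_cons, List.any_nil, ge_iff_le, Bool.decide_or, Bool.or_false, zero_add]
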